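-- pv_equiv track=rewrite | github.com/miliar/Code_Jam_Webscraper | solutions_python/Problem_178/1629.py | getLastIndexFalse
-- ===== SOURCE A (Python) =====
-- def getLastIndexFalse(pancakes):
--     i = 0
--     last = 0
--     for p in pancakes:
--         if not p:
--             last = i
--         i += 1
--     return last
-- ===== SOURCE B (Python) =====
-- def getLastIndexFalse(pancakes):
--     for j in range(len(pancakes) - 1, -1, -1):
--         if not pancakes[j]:
--             return j
--     return 0
-- ===== Notes on version B (the rewrite author's own statement) =====
-- stated objective: alternative
-- what changed: Backward scan from the last index with an early return on the first falsy element, instead of a forward pass maintaining a running 'last' accumulator over the whole list.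
import Mathlib
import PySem

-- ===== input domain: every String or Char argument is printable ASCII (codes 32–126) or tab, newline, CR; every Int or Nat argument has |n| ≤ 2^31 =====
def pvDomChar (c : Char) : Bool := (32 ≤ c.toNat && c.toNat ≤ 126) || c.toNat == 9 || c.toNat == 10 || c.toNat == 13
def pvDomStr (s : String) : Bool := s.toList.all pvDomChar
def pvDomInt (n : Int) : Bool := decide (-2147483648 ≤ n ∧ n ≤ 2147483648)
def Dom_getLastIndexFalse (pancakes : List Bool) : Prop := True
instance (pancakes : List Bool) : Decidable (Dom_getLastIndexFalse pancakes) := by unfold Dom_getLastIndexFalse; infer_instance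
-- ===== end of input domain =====

-- B replaces A's forward accumulator pass by a backward scan with an early return (alternative decomposition, same cost).

-- ===== PORT A =====
-- forward loop: state (i, last); 'if not p: last = i'; 'i += 1'
def getLastIndexFalse (pancakes : List Bool) : Int :=
  (pancakes.foldl (fun (s : Int × Int) (p : Bool) =>
      (s.1 + 1, if !p then s.1 else s.2)) (0, 0)).2

-- ===== PORT B =====
-- 'for j in range(len-1, -1, -1): if not pancakes[j]: return j' ; 'return 0'
-- downward scan over index j; at j = 0 both branches of B return 0
def pvAltGo (pancakes : List Bool) : Nat → Int
  | 0 => 0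
  | j + 1 => if !(pancakes.getD (j + 1) true) then ((j : Int) + 1) else pvAltGo pancakes j

def getLastIndexFalse_alt (pancakes : List Bool) : Int :=
  match pancakes.length with
  | 0 => 0
  | n + 1 => pvAltGo pancakes n

-- ===== PRECONDITION & SPEC =====
def Spec_getLastIndexFalse (pancakes : List Bool) (out : Int) : Prop := out = getLastIndexFalse_alt pancakes
instance (pancakes : List Bool) (out : Int) : Decidable (Spec_getLastIndexFalse pancakes out) := by unfold Spec_getLastIndexFalse; infer_instance

-- ===== CLAIM (what is proved, stated in full; the proofs are below) =====
def Claim_equal_getLastIndexFalse : Prop := ∀ (pancakes : List Bool), Dom_getLastIndexFalse pancakes → Spec_getLastIndexFalse pancakes (getLastIndexFalse pancakes)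

-- ===== LEMMAS AND PROOFS =====

-- A's loop counter: first component of the fold is init + length
theorem pvFoldFst (xs : List Bool) (s : Int × Int) :
    (List.foldl (fun (s : Int × Int) (p : Bool) =>
        (s.1 + 1, if p = false then s.1 else s.2)) s xs).1
      = s.1 + xs.length := by
  induction xs generalizing s with
  | nil => simp
  | cons x xs ih =>
      rw [List.foldl_cons, ih]
      push_cast [List.length_cons]
      ring

-- A's recurrence from the back
theorem pvA_append (xs : List Bool) (x : Bool) :
    getLastIndexFalse (xs ++ [x])
      = if x then getLastIndexFalse xs else (xs.length : Int) := by
  unfold getLastIndexFalse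
  rw [List.foldl_append]
  cases x <;> simp [pvFoldFst]

-- pvAltGo only looks at indices ≤ j
theorem pvAltGo_congr (xs : List Bool) (x : Bool) (j : Nat) (hj : j < xs.length) :
    pvAltGo (xs ++ [x]) j = pvAltGo xs j := by
  induction j with
  | zero => simp [pvAltGo]
  | succ j ih =>
      have h1 : j + 1 < xs.length := hj
      have : (xs ++ [x]).getD (j + 1) true = xs.getD (j + 1) true := by
        simp [List.getD, List.getElem?_append_left h1]
      rw [pvAltGo, pvAltGo, this, ih (Nat.lt_of_succ_lt hj)]

-- B's recurrence from the back
theorem pvAlt_append (xs : List Bool) (x : Bool) :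
    getLastIndexFalse_alt (xs ++ [x])
      = if x then getLastIndexFalse_alt xs else (xs.length : Int) := by
  unfold getLastIndexFalse_alt
  have hlen : (xs ++ [x]).length = xs.length + 1 := by simp
  rw [hlen]
  cases hx : xs.length with
  | zero =>
      have hnil : xs = [] := List.eq_nil_of_length_eq_zero hx
      subst hnil
      cases x <;> simp [pvAltGo]
  | succ m =>
      simp only []
      have hget : (xs ++ [x]).getD (m + 1) true = x := by
        have h1 : xs.length ≤ m + 1 := by omega
        rw [List.getD, List.getElem?_append_right h1, hx]
        simp
      rw [pvAltGo, hget]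
      cases x with
      | false => simp
      | true =>
          simp only [Bool.not_true, Bool.false_eq_true, if_pos]
          simp [pvAltGo_congr xs true m (by omega)]

theorem pvMain (xs : List Bool) : getLastIndexFalse xs = getLastIndexFalse_alt xs := by
  induction xs using List.reverseRecOn with
  | nil => decide
  | append_singleton xs x ih => rw [pvA_append, pvAlt_append, ih]

-- ===== VERDICT (by name: the statement is the Claim_ definition above) =====
theorem getLastIndexFalse_spec : Claim_equal_getLastIndexFalse := by
  intro pancakes _
  unfold Spec_getLastIndexFalse
  exact pvMain pancakes
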